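-- pv_equiv track=rewrite | github.com/krishnauniqus-ux/fusion_Migration | features/validation/engine.py | _apply_title_case
-- ===== SOURCE A (Python) =====
-- def _apply_title_case(text: str) -> str:
--     """Return text converted to title case for comparison."""
--     small_words = {'a', 'an', 'and', 'as', 'at', 'but', 'by', 'for',
--                    'in', 'of', 'on', 'or', 'the', 'to', 'with'}
--     words = text.split()
--     if not words:
--         return text
--     result = []
--     for i, word in enumerate(words):
--         if i == 0 or i == len(words) - 1:
--             result.append(word.capitalize())
--         elif word.lower() in small_words:
--             result.append(word.lower())
--         else:
--             result.append(word.capitalize())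
--     return ' '.join(result)
-- ===== SOURCE B (Python) =====
-- def _apply_title_case(text: str) -> str:
--     """Return text converted to title case for comparison."""
--     small_words = {'a', 'an', 'and', 'as', 'at', 'but', 'by', 'for',
--                    'in', 'of', 'on', 'or', 'the', 'to', 'with'}
--     words = text.split()
--     if not words:
--         return text
--     if len(words) == 1:
--         return words[0].capitalize()
--     # build the result back-to-front: start from the (always capitalized) last
--     # word and prepend each middle word, then the (always capitalized) first.
--     acc = words[-1].capitalize()
--     for w in reversed(words[1:-1]):
--         lw = w.lower()
--         acc = (lw if lw in small_words else w.capitalize()) + ' ' + acc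
--     return words[0].capitalize() + ' ' + acc
-- ===== Notes on version B (the rewrite author's own statement) =====
-- stated objective: alternative
-- what changed: A walks the words forward with an indexed enumerate loop, deciding each word by comparing its position against 0 and len-1, collects pieces in a list and joins them; B builds the string back-to-front with an accumulator: it starts from the capitalized last word, prepends each middle word walking reversed(words[1:-1]), then prepends the capitalized first word - no indices, no result list, no join.
import Mathlib
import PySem

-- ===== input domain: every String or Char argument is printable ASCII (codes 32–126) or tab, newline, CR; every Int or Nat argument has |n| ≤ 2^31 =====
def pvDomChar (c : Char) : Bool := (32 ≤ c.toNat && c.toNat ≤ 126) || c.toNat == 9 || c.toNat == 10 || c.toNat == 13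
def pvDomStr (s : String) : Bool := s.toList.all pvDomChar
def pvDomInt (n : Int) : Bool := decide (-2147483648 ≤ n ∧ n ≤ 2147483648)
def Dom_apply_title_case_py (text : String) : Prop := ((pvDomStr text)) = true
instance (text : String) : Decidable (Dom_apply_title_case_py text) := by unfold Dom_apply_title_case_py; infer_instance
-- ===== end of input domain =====

-- B replaces A's forward indexed loop + result list + join by a back-to-front build:
-- an accumulator starts from the capitalized last word, each middle word is prepended
-- walking the reversed middle, then the capitalized first word (objective: alternative).

-- shared helpers (both Pythons use the same small-word set and str.capitalize)
def pvSmallWords : List String :=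
  ["a", "an", "and", "as", "at", "but", "by", "for",
   "in", "of", "on", "or", "the", "to", "with"]

-- str.capitalize: first char uppercased, rest lowered (exact on the ASCII domain)
def pvCapChars (cs : List Char) : List Char :=
  match cs with
  | [] => []
  | c :: rest => PySem.Chars.upperChar c :: rest.map PySem.Chars.lowerChar

def pvCap (w : String) : String := String.ofList (pvCapChars w.toList)

-- ===== PORT A =====
def apply_title_case_py (text : String) : String :=
  let words := PySem.Str.split₀ text
  if words = [] then text
  else
    let result := (PySem.List.enumerate words).foldl (fun res p =>
      if p.1 == 0 || p.1 == (words.length : Int) - 1 then res ++ [pvCap p.2]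
      else if pvSmallWords.contains (PySem.Str.lower p.2) then res ++ [PySem.Str.lower p.2]
      else res ++ [pvCap p.2]) []
    PySem.Str.join " " result

-- ===== PORT B =====
def apply_title_case_py_alt (text : String) : String :=
  match PySem.Str.split₀ text with
  | [] => text
  | w :: ws =>                -- words = w :: ws; words[-1] = ws.getLastD, words[1:-1] = ws.dropLast
    if ws = [] then pvCap w
    else
      let acc := (ws.dropLast.reverse).foldl (fun acc v =>
        (if pvSmallWords.contains (PySem.Str.lower v) then PySem.Str.lower v else pvCap v)
          ++ " " ++ acc) (pvCap (ws.getLastD ""))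
      pvCap w ++ " " ++ acc

-- ===== PRECONDITION & SPEC =====
def Spec_apply_title_case_py (text : String) (out : String) : Prop := out = apply_title_case_py_alt text
instance (text : String) (out : String) : Decidable (Spec_apply_title_case_py text out) := by unfold Spec_apply_title_case_py; infer_instance

-- ===== CLAIM (what is proved, stated in full; the proofs are below) =====
def Claim_equal_apply_title_case_py : Prop := ∀ (text : String), Dom_apply_title_case_py text → Spec_apply_title_case_py text (apply_title_case_py text)

-- ===== LEMMAS AND PROOFS =====

-- per-word decision of A's loop body
def pvG (n : Int) (p : Int × String) : String :=
  if p.1 == 0 || p.1 == n - 1 then pvCap p.2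
  else if pvSmallWords.contains (PySem.Str.lower p.2) then PySem.Str.lower p.2
  else pvCap p.2

theorem pvFoldA (words : List String) :
    (PySem.List.enumerate words).foldl (fun res p =>
      if p.1 == 0 || p.1 == (words.length : Int) - 1 then res ++ [pvCap p.2]
      else if pvSmallWords.contains (PySem.Str.lower p.2) then res ++ [PySem.Str.lower p.2]
      else res ++ [pvCap p.2]) []
      = (PySem.List.enumerate words).map (pvG (words.length : Int)) := by
  have hbody : (fun (res : List String) (p : Int × String) =>
      if p.1 == 0 || p.1 == (words.length : Int) - 1 then res ++ [pvCap p.2]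
      else if pvSmallWords.contains (PySem.Str.lower p.2) then res ++ [PySem.Str.lower p.2]
      else res ++ [pvCap p.2]) = (fun res p => res ++ [pvG (words.length : Int) p]) := by
    funext res p
    simp only [pvG]
    split
    · rfl
    · split <;> rfl
  rw [hbody, PySem.List.foldl_append_singleton_eq_map, List.nil_append]

theorem pvJoinCons (x y : String) (l : List String) :
    PySem.Str.join " " (x :: y :: l) = x ++ " " ++ PySem.Str.join " " (y :: l) := by
  apply String.toList_injective
  simp [PySem.Str.join, PySem.Chars.join_cons_cons]

-- proof-side name for B's back-to-front build (foldl over the reversed middle = foldr)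
def pvB (ws : List String) : String :=
  ws.dropLast.foldr (fun v acc =>
    (if pvSmallWords.contains (PySem.Str.lower v) then PySem.Str.lower v else pvCap v)
      ++ " " ++ acc) (pvCap (ws.getLastD ""))

-- key lemma: A's map over a strict suffix, joined, is B's back-to-front build
theorem pvTailEq (n : Int) (ws : List String) (s : Int) (hw : ws ≠ [])
    (hs : 1 ≤ s) (hn : s + ws.length = n) :
    PySem.Str.join " " ((PySem.List.enumerate ws s).map (pvG n)) = pvB ws := by
  induction ws generalizing s with
  | nil => exact absurd rfl hw
  | cons x rest ih =>
    cases rest with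
    | nil =>
      have hlast : (s == 0 || s == n - 1) = true := by
        simp only [Bool.or_eq_true, beq_iff_eq]
        right; simp at hn; omega
      simp [PySem.List.enumerate_cons, PySem.List.enumerate_nil, pvG, hlast,
        PySem.Str.join, pvB]
    | cons y rest' =>
      have hx : (s == 0 || s == n - 1) = false := by
        simp only [Bool.or_eq_false_iff, beq_eq_false_iff_ne]
        constructor <;> [omega; (simp at hn; omega)]
      rw [PySem.List.enumerate_cons, List.map_cons, PySem.List.enumerate_cons,
        List.map_cons, pvJoinCons, ← List.map_cons, ← PySem.List.enumerate_cons]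
      rw [ih (s + 1) (by simp) (by omega) (by simp at hn ⊢; omega)]
      simp only [pvG, hx, Bool.false_eq_true, if_false, pvB,
        List.dropLast_cons_of_ne_nil (by simp : y :: rest' ≠ ([] : List String)),
        List.foldr_cons, List.getLastD_cons]

theorem pvMainEq (words : List String) (h : words ≠ []) :
    PySem.Str.join " " ((PySem.List.enumerate words).map (pvG (words.length : Int))) =
      (match words with
       | [] => ""
       | w :: ws => if ws = [] then pvCap w else pvCap w ++ " " ++ pvB ws) := by
  cases words with
  | nil => exact absurd rfl h
  | cons w ws =>
    cases ws with
    | nil =>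
      simp [PySem.List.enumerate_cons, PySem.List.enumerate_nil, pvG, PySem.Str.join]
    | cons y rest =>
      rw [PySem.List.enumerate_cons, List.map_cons, PySem.List.enumerate_cons,
        List.map_cons, pvJoinCons, ← List.map_cons, ← PySem.List.enumerate_cons]
      rw [zero_add, pvTailEq ((w :: y :: rest).length : Int) (y :: rest) 1 (by simp) le_rfl
        (by simp; omega)]
      simp [pvG]

-- ===== VERDICT (by name: the statement is the Claim_ definition above) =====
theorem apply_title_case_py_spec : Claim_equal_apply_title_case_py := by
  intro text _
  unfold Spec_apply_title_case_py apply_title_case_py apply_title_case_py_alt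
  cases hsp : PySem.Str.split₀ text with
  | nil => simp
  | cons w ws =>
    simp only [reduceCtorEq, if_false, List.foldl_reverse]
    rw [pvFoldA, pvMainEq (w :: ws) (by simp)]
    rfl
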